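-- pv_equiv track=rewrite | github.com/klausfrieler/melospy | melospy/basic_representations/jm_util.py | fill_up_vector
-- ===== SOURCE A (Python) =====
-- def fill_up_vector(vec, default):
--     """fill gaps in vector which contains only change points
--         (such chord lists in AnnotatedBeatTracks)
--     """
--     if len(vec) == 0:
--         return vec
--     ret = []
--     if not vec[0]:
--         vec[0] = default
--
--     last = vec[0]
--     for v in vec:
--         if not v:
--             ret.append(last)
--         else:
--             ret.append(v)
--             last = v
--     return ret
-- ===== SOURCE B (Python) =====
-- def fill_up_vector(vec, default):
--     if len(vec) == 0:
--         return vec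
--     if not vec[0]:
--         vec[0] = default
--     # run-based: find each maximal run of empty slots and emit the run's
--     # head value replicated over the whole run
--     ret = []
--     i = 0
--     n = len(vec)
--     while i < n:
--         v = vec[i]
--         j = i + 1
--         while j < n and not vec[j]:
--             j += 1
--         ret.extend([v] * (j - i))
--         i = j
--     return ret
-- ===== Notes on version B (the rewrite author's own statement) =====
-- stated objective: alternative
-- what changed: Replaced the per-element loop carrying a 'last' variable by a run-based algorithm: an outer loop jumps from change point to change point, an inner scan finds the end of each run of empty slots, and the run's head value is emitted replicated over the run.
import Mathlib
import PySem

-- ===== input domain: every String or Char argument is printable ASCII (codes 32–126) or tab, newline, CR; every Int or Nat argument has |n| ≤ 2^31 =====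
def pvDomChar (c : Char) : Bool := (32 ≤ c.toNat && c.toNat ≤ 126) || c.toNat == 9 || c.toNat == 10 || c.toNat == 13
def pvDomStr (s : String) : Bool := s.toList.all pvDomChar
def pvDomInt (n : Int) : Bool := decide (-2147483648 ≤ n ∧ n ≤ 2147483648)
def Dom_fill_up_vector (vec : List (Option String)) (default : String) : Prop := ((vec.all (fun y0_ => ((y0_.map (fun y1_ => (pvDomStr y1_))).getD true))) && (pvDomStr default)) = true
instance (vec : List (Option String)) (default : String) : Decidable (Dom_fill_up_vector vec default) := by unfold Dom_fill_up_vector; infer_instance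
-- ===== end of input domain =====

-- B replaces A's per-element carry loop by a run-based algorithm (replicate over each run
-- of empty slots); same cost. Both Pythons mutate vec[0] in place when it is falsy;
-- the equivalence proved here is about the RETURN value only.

-- Python truthiness of an Optional[str]: None and "" are falsy.
def pyFalsy (o : Option String) : Bool :=
  match o with
  | none => true
  | some s => s.isEmpty

-- ===== PORT A =====
def fill_up_vector (vec : List (Option String)) (default : String) : List (Option String) :=
  match vec with
  | [] => []
  | v0 :: rest =>
    -- if not vec[0]: vec[0] = default
    let v0' := if pyFalsy v0 then some default else v0
    -- last = vec[0]; for v in vec: ...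
    (List.foldl
      (fun (st : List (Option String) × Option String) v =>
        if pyFalsy v then (st.1 ++ [st.2], st.2) else (st.1 ++ [v], v))
      ([], v0') (v0' :: rest)).1

-- ===== PORT B =====
-- outer while-loop over runs: v = vec[i]; inner while scans the falsy run after i
-- (takeWhile/dropWhile), then ret.extend([v] * (j - i)) and i = j.
def fillRuns (vec : List (Option String)) : List (Option String) :=
  match vec with
  | [] => []
  | v :: rest =>
    List.replicate ((rest.takeWhile pyFalsy).length + 1) v ++ fillRuns (rest.dropWhile pyFalsy)
termination_by vec.length
decreasing_by
  simp only [List.length_cons]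
  exact Nat.lt_succ_of_le (List.length_dropWhile_le _ _)

def fill_up_vector_alt (vec : List (Option String)) (default : String) : List (Option String) :=
  match vec with
  | [] => []
  | v0 :: rest =>
    let v0' := if pyFalsy v0 then some default else v0
    fillRuns (v0' :: rest)

-- ===== PRECONDITION & SPEC =====
def Spec_fill_up_vector (vec : List (Option String)) (default : String) (out : List (Option String)) : Prop := out = fill_up_vector_alt vec default
instance (vec : List (Option String)) (default : String) (out : List (Option String)) : Decidable (Spec_fill_up_vector vec default out) := by unfold Spec_fill_up_vector; infer_instance

-- ===== CLAIM (what is proved, stated in full; the proofs are below) =====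
def Claim_equal_fill_up_vector : Prop := ∀ (vec : List (Option String)) (default : String), Dom_fill_up_vector vec default → Spec_fill_up_vector vec default (fill_up_vector vec default)

-- ===== LEMMAS AND PROOFS =====

-- A's loop as a simple recursive carry (proof-only).
def carry (last : Option String) : List (Option String) → List (Option String)
  | [] => []
  | v :: l => if pyFalsy v then last :: carry last l else v :: carry v l

theorem foldl_eq_carry (l : List (Option String)) (acc : List (Option String)) (last : Option String) :
    (List.foldl
      (fun (st : List (Option String) × Option String) v =>
        if pyFalsy v then (st.1 ++ [st.2], st.2) else (st.1 ++ [v], v))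
      (acc, last) l).1 = acc ++ carry last l := by
  induction l generalizing acc last with
  | nil => simp [carry]
  | cons x xs ih =>
    by_cases h : pyFalsy x = true <;>
      simp [carry, h, ih, List.append_assoc]

theorem fillRuns_eq_carry (l : List (Option String)) : ∀ v, fillRuns (v :: l) = v :: carry v l := by
  induction l with
  | nil => intro v; simp [fillRuns, carry]
  | cons w rest ih =>
    intro v
    by_cases h : pyFalsy w = true
    · rw [fillRuns]
      simp only [List.takeWhile_cons, List.dropWhile_cons, h, if_true]
      have := ih v
      rw [fillRuns] at this
      simp only [carry, h, if_true]
      rw [List.replicate_succ, List.cons_append, List.length_cons, this]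
    · rw [fillRuns]
      simp only [List.takeWhile_cons, List.dropWhile_cons, h, Bool.false_eq_true, if_false]
      simp only [carry, h, Bool.false_eq_true, if_false]
      rw [ih w, List.length_nil, Nat.zero_add, List.replicate_one, List.singleton_append]

-- ===== VERDICT (by name: the statement is the Claim_ definition above) =====
theorem fill_up_vector_spec : Claim_equal_fill_up_vector := by
  intro vec default _
  unfold Spec_fill_up_vector fill_up_vector fill_up_vector_alt
  cases vec with
  | nil => rfl
  | cons v0 rest =>
    simp only
    rw [fillRuns_eq_carry]
    set v0' := if pyFalsy v0 then some default else v0 with hv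
    have : carry v0' (v0' :: rest) = v0' :: carry v0' rest := by
      by_cases h : pyFalsy v0' = true <;> simp [carry, h]
    calc (List.foldl _ ([], v0') (v0' :: rest)).1
        = [] ++ carry v0' (v0' :: rest) := foldl_eq_carry _ _ _
      _ = v0' :: carry v0' rest := by rw [this]; rfl
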